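-- pv_equiv track=rewrite | github.com/uiheonn/codingtest-workspace | backjun/dp/9184.py | dp
-- ===== SOURCE A (Python) =====
-- dpList = [[[0] * (21) for _ in range(21)] for _ in range(21)]
--
-- def dp(a, b, c):
--     if a <= 0 or b <= 0 or c <= 0:
--         return 1
--     if a > 20 or b > 20 or c > 20:
--         return dp(20, 20, 20)
--     if dpList[a][b][c]:
--         return dpList[a][b][c]
--     if a < b < c:
--         dpList[a][b][c] = dp(a,b,c-1) + dp(a,b-1,c-1) - dp(a,b-1,c)
--         return dpList[a][b][c]
--     dpList[a][b][c] = dp(a-1,b,c) + dp(a-1,b-1,c) + dp(a-1,b,c-1) - dp(a-1,b-1,c-1)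
--     return dpList[a][b][c]
-- ===== SOURCE B (Python) =====
-- def dp(a, b, c):
--     # Bottom-up sweep: fill the whole 1..20 cube once per call, then look up.
--     t = {}
--     def get(x, y, z):
--         return 1 if x == 0 or y == 0 or z == 0 else t[(x, y, z)]
--     for x in range(1, 21):
--         for y in range(1, 21):
--             for z in range(1, 21):
--                 if x < y and y < z:
--                     t[(x, y, z)] = get(x, y, z - 1) + get(x, y - 1, z - 1) - get(x, y - 1, z)
--                 else:
--                     t[(x, y, z)] = get(x - 1, y, z) + get(x - 1, y - 1, z) + get(x - 1, y, z - 1) - get(x - 1, y - 1, z - 1)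
--     if a <= 0 or b <= 0 or c <= 0:
--         return 1
--     if a > 20 or b > 20 or c > 20:
--         return t[(20, 20, 20)]
--     return t[(a, b, c)]
-- ===== Notes on version B (the rewrite author's own statement) =====
-- stated objective: alternative
-- what changed: Replaces top-down memoized recursion backed by a global 21x21x21 list with a bottom-up forward sweep that fills a dict over the whole 1..20 cube in lexicographic order and then answers by a single lookup, clamping arguments above 20 to the top cube corner and non-positive ones to 1.
import Mathlib
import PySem

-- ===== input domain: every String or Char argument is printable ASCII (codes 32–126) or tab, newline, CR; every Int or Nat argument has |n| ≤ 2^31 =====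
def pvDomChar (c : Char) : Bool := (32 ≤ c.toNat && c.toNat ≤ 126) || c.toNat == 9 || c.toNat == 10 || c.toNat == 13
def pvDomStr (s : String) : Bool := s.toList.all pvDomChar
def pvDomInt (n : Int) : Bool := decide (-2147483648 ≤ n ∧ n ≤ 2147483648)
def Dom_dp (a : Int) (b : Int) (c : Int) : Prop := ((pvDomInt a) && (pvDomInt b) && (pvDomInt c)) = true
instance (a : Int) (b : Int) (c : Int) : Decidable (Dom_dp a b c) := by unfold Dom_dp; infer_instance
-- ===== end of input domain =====

-- B replaces A's top-down memoized recursion with a bottom-up lexicographic sweep filling a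
-- table over the 1..20 cube (objective: alternative). A mutates the global memo list dpList;
-- the equivalence proved here is about the return value only.

-- ===== PORT A =====
-- A's global memo dpList is threaded explicitly as a dict keyed by (a,b,c); 'if dpList[a][b][c]:'
-- is the truthiness test 'cached value ≠ 0' (a missing key reads as the initial 0). The fuel
-- parameter only makes the same recursion total: dp supplies 62, more than the recursion depth
-- ever reached (proved below), so the 0-fuel branch is never taken.
def dpGo : Nat → PySem.Dict (Int × Int × Int) Int → Int → Int → Int →
    PySem.Dict (Int × Int × Int) Int × Int
  | 0, t, _, _, _ => (t, 0)
  | fuel + 1, t, a, b, c =>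
    if a ≤ 0 ∨ b ≤ 0 ∨ c ≤ 0 then (t, 1)
    else if 20 < a ∨ 20 < b ∨ 20 < c then dpGo fuel t 20 20 20
    else if PySem.Dict.getD t (a, b, c) 0 ≠ 0 then (t, PySem.Dict.getD t (a, b, c) 0)
    else if a < b ∧ b < c then
      let r1 := dpGo fuel t a b (c - 1)
      let r2 := dpGo fuel r1.1 a (b - 1) (c - 1)
      let r3 := dpGo fuel r2.1 a (b - 1) c
      let v := r1.2 + r2.2 - r3.2
      (PySem.Dict.insert r3.1 (a, b, c) v, v)
    else
      let r1 := dpGo fuel t (a - 1) b c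
      let r2 := dpGo fuel r1.1 (a - 1) (b - 1) c
      let r3 := dpGo fuel r2.1 (a - 1) b (c - 1)
      let r4 := dpGo fuel r3.1 (a - 1) (b - 1) (c - 1)
      let v := r1.2 + r2.2 + r3.2 - r4.2
      (PySem.Dict.insert r4.1 (a, b, c) v, v)

def dp (a : Int) (b : Int) (c : Int) : Int := (dpGo 62 PySem.Dict.empty a b c).2

-- ===== PORT B =====
-- helper 'get' of Source B; the 'else' lookup t[(x,y,z)] always finds its key when the sweep reads
-- it, so getD's default 0 is never taken (proved below).
def pyw_get (t : PySem.Dict (Int × Int × Int) Int) (x y z : Int) : Int :=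
  if x = 0 ∨ y = 0 ∨ z = 0 then 1 else PySem.Dict.getD t (x, y, z) 0

-- the value stored by one iteration of Source B's innermost loop body
def tabVal (t : PySem.Dict (Int × Int × Int) Int) (k : Int × Int × Int) : Int :=
  if k.1 < k.2.1 ∧ k.2.1 < k.2.2 then
    pyw_get t k.1 k.2.1 (k.2.2 - 1) + pyw_get t k.1 (k.2.1 - 1) (k.2.2 - 1)
      - pyw_get t k.1 (k.2.1 - 1) k.2.2
  else
    pyw_get t (k.1 - 1) k.2.1 k.2.2 + pyw_get t (k.1 - 1) (k.2.1 - 1) k.2.2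
      + pyw_get t (k.1 - 1) k.2.1 (k.2.2 - 1) - pyw_get t (k.1 - 1) (k.2.1 - 1) (k.2.2 - 1)

def tabStep (t : PySem.Dict (Int × Int × Int) Int) (k : Int × Int × Int) :
    PySem.Dict (Int × Int × Int) Int :=
  PySem.Dict.insert t k (tabVal t k)

-- Source B's local dict t after the three nested loops (it does not depend on a, b, c)
def dpTable : PySem.Dict (Int × Int × Int) Int :=
  (PySem.List.pyRange 1 21 1).foldl (fun t x =>
    (PySem.List.pyRange 1 21 1).foldl (fun t y =>
      (PySem.List.pyRange 1 21 1).foldl (fun t z => tabStep t (x, y, z)) t) t)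
    PySem.Dict.empty

def dp_alt (a : Int) (b : Int) (c : Int) : Int :=
  if a ≤ 0 ∨ b ≤ 0 ∨ c ≤ 0 then 1
  else if 20 < a ∨ 20 < b ∨ 20 < c then PySem.Dict.getD dpTable (20, 20, 20) 0
  else PySem.Dict.getD dpTable (a, b, c) 0

-- ===== PRECONDITION & SPEC =====
def Spec_dp (a : Int) (b : Int) (c : Int) (out : Int) : Prop := out = dp_alt a b c
instance (a : Int) (b : Int) (c : Int) (out : Int) : Decidable (Spec_dp a b c out) := by unfold Spec_dp; infer_instance

-- ===== CLAIM (what is proved, stated in full; the proofs are below) =====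
def Claim_equal_dp : Prop := ∀ (a : Int) (b : Int) (c : Int), Dom_dp a b c → Spec_dp a b c (dp a b c)

-- ===== LEMMAS AND PROOFS =====

-- the mathematical w-function both programs compute on the cube
def W (a b c : Int) : Int :=
  if a ≤ 0 ∨ b ≤ 0 ∨ c ≤ 0 then 1
  else if a < b ∧ b < c then W a b (c - 1) + W a (b - 1) (c - 1) - W a (b - 1) c
  else W (a - 1) b c + W (a - 1) (b - 1) c + W (a - 1) b (c - 1) - W (a - 1) (b - 1) (c - 1)
termination_by (a.toNat + b.toNat + c.toNat)
decreasing_by all_goals omega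

-- W with the common clamping of both programs
def WClamp (a b c : Int) : Int :=
  if a ≤ 0 ∨ b ≤ 0 ∨ c ≤ 0 then 1
  else if 20 < a ∨ 20 < b ∨ 20 < c then W 20 20 20
  else W a b c

theorem W_base (a b c : Int) (h : a ≤ 0 ∨ b ≤ 0 ∨ c ≤ 0) : W a b c = 1 := by
  rw [W, if_pos h]

theorem W_rec (a b c : Int) (h : ¬(a ≤ 0 ∨ b ≤ 0 ∨ c ≤ 0)) :
    W a b c = if a < b ∧ b < c then W a b (c - 1) + W a (b - 1) (c - 1) - W a (b - 1) c
      else W (a - 1) b c + W (a - 1) (b - 1) c + W (a - 1) b (c - 1) - W (a - 1) (b - 1) (c - 1) := by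
  rw [W, if_neg h]

theorem WClamp_eq_W (a b c : Int) (ha : a ≤ 20) (hb : b ≤ 20) (hc : c ≤ 20) :
    WClamp a b c = W a b c := by
  unfold WClamp
  split_ifs with h1 h2
  · exact (W_base a b c h1).symm
  · exact absurd h2 (by omega)
  · rfl

-- ---- A-side: the memoized recursion computes WClamp ----

-- recursion-depth measure for A's memoized recursion (proof-side only)
def dpMeasure (a : Int) (b : Int) (c : Int) : Nat :=
  if 20 < a ∨ 20 < b ∨ 20 < c then 61 else a.toNat + b.toNat + c.toNat

theorem dpDec_clamp (a b c : Int) (h1 : ¬(a ≤ 0 ∨ b ≤ 0 ∨ c ≤ 0)) (h2 : 20 < a ∨ 20 < b ∨ 20 < c) :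
    dpMeasure 20 20 20 < dpMeasure a b c := by
  unfold dpMeasure; split_ifs <;> omega

theorem dpDec_step (a b c x y z : Int) (h1 : ¬(a ≤ 0 ∨ b ≤ 0 ∨ c ≤ 0))
    (h2 : ¬(20 < a ∨ 20 < b ∨ 20 < c)) (h3 : 0 ≤ x) (h4 : x ≤ a) (h5 : 0 ≤ y) (h6 : y ≤ b)
    (h7 : 0 ≤ z) (h8 : z ≤ c) (h9 : x + y + z < a + b + c) :
    dpMeasure x y z < dpMeasure a b c := by
  unfold dpMeasure; split_ifs <;> omega

def GoodT (t : PySem.Dict (Int × Int × Int) Int) : Prop :=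
  ∀ k v, PySem.Dict.get? t k = some v → v = W k.1 k.2.1 k.2.2

theorem dpGo_correct : ∀ (fuel : Nat) (a b c : Int) (t : PySem.Dict (Int × Int × Int) Int),
    dpMeasure a b c < fuel → GoodT t →
    GoodT (dpGo fuel t a b c).1 ∧ (dpGo fuel t a b c).2 = WClamp a b c := by
  intro fuel
  induction fuel with
  | zero => intro a b c t hm _; exact absurd hm (by omega)
  | succ fuel ih =>
    intro a b c t hm hg
    show GoodT (dpGo (fuel + 1) t a b c).1 ∧ (dpGo (fuel + 1) t a b c).2 = WClamp a b c
    rw [dpGo]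
    split_ifs with h1 h2 h3 h4
    · exact ⟨hg, by rw [WClamp, if_pos h1]⟩
    · have hlt : dpMeasure 20 20 20 < dpMeasure a b c := dpDec_clamp a b c h1 h2
      obtain ⟨hgood, hval⟩ := ih 20 20 20 t (by omega) hg
      refine ⟨hgood, ?_⟩
      rw [hval, WClamp_eq_W 20 20 20 (by omega) (by omega) (by omega)]
      unfold WClamp
      rw [if_neg h1, if_pos h2]
    · -- cached hit
      refine ⟨hg, ?_⟩
      rw [PySem.Dict.getD_eq_get?_getD] at h3 ⊢
      cases hq : PySem.Dict.get? t (a, b, c) with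
      | none => rw [hq] at h3; simp at h3
      | some v =>
        have hv := hg (a, b, c) v hq
        show v = WClamp a b c
        unfold WClamp
        rw [if_neg h1, if_neg h2]
        exact hv
    · -- a < b < c branch
      have hb1 := h1; have hb2 := h2
      push_neg at hb1 hb2
      have m1 := dpDec_step a b c a b (c - 1) h1 h2 (by omega) (by omega) (by omega) (by omega) (by omega) (by omega) (by omega)
      have m2 := dpDec_step a b c a (b - 1) (c - 1) h1 h2 (by omega) (by omega) (by omega) (by omega) (by omega) (by omega) (by omega)
      have m3 := dpDec_step a b c a (b - 1) c h1 h2 (by omega) (by omega) (by omega) (by omega) (by omega) (by omega) (by omega)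
      obtain ⟨r1g, r1v⟩ := ih a b (c - 1) t (by omega) hg
      obtain ⟨r2g, r2v⟩ := ih a (b - 1) (c - 1) (dpGo fuel t a b (c - 1)).1 (by omega) r1g
      obtain ⟨r3g, r3v⟩ := ih a (b - 1) c (dpGo fuel (dpGo fuel t a b (c - 1)).1 a (b - 1) (c - 1)).1 (by omega) r2g
      have hW : (dpGo fuel t a b (c - 1)).2
          + (dpGo fuel (dpGo fuel t a b (c - 1)).1 a (b - 1) (c - 1)).2
          - (dpGo fuel (dpGo fuel (dpGo fuel t a b (c - 1)).1 a (b - 1) (c - 1)).1 a (b - 1) c).2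
          = W a b c := by
        rw [r1v, r2v, r3v,
          WClamp_eq_W a b (c - 1) (by omega) (by omega) (by omega),
          WClamp_eq_W a (b - 1) (c - 1) (by omega) (by omega) (by omega),
          WClamp_eq_W a (b - 1) c (by omega) (by omega) (by omega),
          W_rec a b c (by omega), if_pos h4]
      constructor
      · intro k v hk
        rw [PySem.Dict.get?_insert] at hk
        split_ifs at hk with hkk
        · injection hk with hk
          subst hkk
          rw [← hk]
          exact hW
        · exact r3g k v hk
      · show _ = WClamp a b c
        unfold WClamp
        rw [if_neg (by omega), if_neg (by omega)]
        exact hW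
    · -- else branch
      have hb1 := h1; have hb2 := h2
      push_neg at hb1 hb2
      have m1 := dpDec_step a b c (a - 1) b c h1 h2 (by omega) (by omega) (by omega) (by omega) (by omega) (by omega) (by omega)
      have m2 := dpDec_step a b c (a - 1) (b - 1) c h1 h2 (by omega) (by omega) (by omega) (by omega) (by omega) (by omega) (by omega)
      have m3 := dpDec_step a b c (a - 1) b (c - 1) h1 h2 (by omega) (by omega) (by omega) (by omega) (by omega) (by omega) (by omega)
      have m4 := dpDec_step a b c (a - 1) (b - 1) (c - 1) h1 h2 (by omega) (by omega) (by omega) (by omega) (by omega) (by omega) (by omega)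
      obtain ⟨r1g, r1v⟩ := ih (a - 1) b c t (by omega) hg
      obtain ⟨r2g, r2v⟩ := ih (a - 1) (b - 1) c (dpGo fuel t (a - 1) b c).1 (by omega) r1g
      obtain ⟨r3g, r3v⟩ := ih (a - 1) b (c - 1) (dpGo fuel (dpGo fuel t (a - 1) b c).1 (a - 1) (b - 1) c).1 (by omega) r2g
      obtain ⟨r4g, r4v⟩ := ih (a - 1) (b - 1) (c - 1) (dpGo fuel (dpGo fuel (dpGo fuel t (a - 1) b c).1 (a - 1) (b - 1) c).1 (a - 1) b (c - 1)).1 (by omega) r3g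
      have hW : (dpGo fuel t (a - 1) b c).2
          + (dpGo fuel (dpGo fuel t (a - 1) b c).1 (a - 1) (b - 1) c).2
          + (dpGo fuel (dpGo fuel (dpGo fuel t (a - 1) b c).1 (a - 1) (b - 1) c).1 (a - 1) b (c - 1)).2
          - (dpGo fuel (dpGo fuel (dpGo fuel (dpGo fuel t (a - 1) b c).1 (a - 1) (b - 1) c).1 (a - 1) b (c - 1)).1 (a - 1) (b - 1) (c - 1)).2
          = W a b c := by
        rw [r1v, r2v, r3v, r4v,
          WClamp_eq_W (a - 1) b c (by omega) (by omega) (by omega),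
          WClamp_eq_W (a - 1) (b - 1) c (by omega) (by omega) (by omega),
          WClamp_eq_W (a - 1) b (c - 1) (by omega) (by omega) (by omega),
          WClamp_eq_W (a - 1) (b - 1) (c - 1) (by omega) (by omega) (by omega),
          W_rec a b c (by omega), if_neg h4]
      constructor
      · intro k v hk
        rw [PySem.Dict.get?_insert] at hk
        split_ifs at hk with hkk
        · injection hk with hk
          subst hkk
          rw [← hk]
          exact hW
        · exact r4g k v hk
      · show _ = WClamp a b c
        unfold WClamp
        rw [if_neg (by omega), if_neg (by omega)]
        exact hW

theorem dp_eq_WClamp (a b c : Int) : dp a b c = WClamp a b c := by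
  have hg : GoodT PySem.Dict.empty := by
    intro k v hk
    rw [PySem.Dict.get?_empty] at hk
    exact absurd hk (by simp)
  have hm : dpMeasure a b c < 62 := by unfold dpMeasure; split_ifs <;> omega
  exact (dpGo_correct 62 a b c PySem.Dict.empty hm hg).2

-- ---- B-side: the bottom-up sweep fills the table with W ----

def CubeK (k : Int × Int × Int) : Prop :=
  1 ≤ k.1 ∧ k.1 ≤ 20 ∧ 1 ≤ k.2.1 ∧ k.2.1 ≤ 20 ∧ 1 ≤ k.2.2 ∧ k.2.2 ≤ 20

def LexLt (j k : Int × Int × Int) : Prop :=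
  j.1 < k.1 ∨ (j.1 = k.1 ∧ (j.2.1 < k.2.1 ∨ (j.2.1 = k.2.1 ∧ j.2.2 < k.2.2)))

theorem lexLt_irrefl (k : Int × Int × Int) : ¬ LexLt k k := by
  unfold LexLt; omega

theorem lexLt_asymm (j k : Int × Int × Int) (h : LexLt j k) : ¬ LexLt k j := by
  unfold LexLt at h ⊢; omega

-- reading a dependency of key K through 'get' yields W, given correctness below K
theorem pyw_get_eq_W (t : PySem.Dict (Int × Int × Int) Int) (K : Int × Int × Int)
    (hd : ∀ j, CubeK j → LexLt j K → PySem.Dict.getD t j 0 = W j.1 j.2.1 j.2.2)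
    (x y z : Int) (hx : 0 ≤ x) (hx2 : x ≤ 20) (hy : 0 ≤ y) (hy2 : y ≤ 20)
    (hz : 0 ≤ z) (hz2 : z ≤ 20) (hlt : LexLt (x, y, z) K) :
    pyw_get t x y z = W x y z := by
  unfold pyw_get
  split_ifs with h
  · exact (W_base x y z (by omega)).symm
  · push_neg at h
    exact hd (x, y, z) (by unfold CubeK; dsimp only; omega) hlt

theorem tabVal_eq_W (t : PySem.Dict (Int × Int × Int) Int) (k : Int × Int × Int)
    (hk : CubeK k)
    (hd : ∀ j, CubeK j → LexLt j k → PySem.Dict.getD t j 0 = W j.1 j.2.1 j.2.2) :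
    tabVal t k = W k.1 k.2.1 k.2.2 := by
  obtain ⟨x, y, z⟩ := k
  obtain ⟨hx1, hx2, hy1, hy2, hz1, hz2⟩ := hk
  simp only at hx1 hx2 hy1 hy2 hz1 hz2
  unfold tabVal
  dsimp only
  rw [W_rec x y z (by omega)]
  split_ifs with h
  · rw [pyw_get_eq_W t (x, y, z) hd x y (z - 1) (by omega) (by omega) (by omega) (by omega)
        (by omega) (by omega) (by unfold LexLt; dsimp only; omega),
      pyw_get_eq_W t (x, y, z) hd x (y - 1) (z - 1) (by omega) (by omega) (by omega) (by omega)
        (by omega) (by omega) (by unfold LexLt; dsimp only; omega),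
      pyw_get_eq_W t (x, y, z) hd x (y - 1) z (by omega) (by omega) (by omega) (by omega)
        (by omega) (by omega) (by unfold LexLt; dsimp only; omega)]
  · rw [pyw_get_eq_W t (x, y, z) hd (x - 1) y z (by omega) (by omega) (by omega) (by omega)
        (by omega) (by omega) (by unfold LexLt; dsimp only; omega),
      pyw_get_eq_W t (x, y, z) hd (x - 1) (y - 1) z (by omega) (by omega) (by omega) (by omega)
        (by omega) (by omega) (by unfold LexLt; dsimp only; omega),
      pyw_get_eq_W t (x, y, z) hd (x - 1) y (z - 1) (by omega) (by omega) (by omega) (by omega)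
        (by omega) (by omega) (by unfold LexLt; dsimp only; omega),
      pyw_get_eq_W t (x, y, z) hd (x - 1) (y - 1) (z - 1) (by omega) (by omega) (by omega)
        (by omega) (by omega) (by omega) (by unfold LexLt; dsimp only; omega)]

theorem fold_inv : ∀ (ks : List (Int × Int × Int)) (t : PySem.Dict (Int × Int × Int) Int),
    List.Pairwise LexLt ks → (∀ k ∈ ks, CubeK k) →
    (∀ k, CubeK k → k ∉ ks → PySem.Dict.getD t k 0 = W k.1 k.2.1 k.2.2) →
    ∀ k, CubeK k → PySem.Dict.getD (ks.foldl tabStep t) k 0 = W k.1 k.2.1 k.2.2 := by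
  intro ks
  induction ks with
  | nil => intro t _ _ h3 k hk; exact h3 k hk (by simp)
  | cons h ks ih =>
    intro t hpw hcube h3 k hk
    rw [List.pairwise_cons] at hpw
    rw [List.foldl_cons]
    refine ih (tabStep t h) hpw.2 (fun k' hk' => hcube k' (by simp [hk'])) ?_ k hk
    intro j hj hjnot
    by_cases hjh : j = h
    · subst hjh
      unfold tabStep
      rw [PySem.Dict.getD_insert, if_pos rfl]
      refine tabVal_eq_W t j hj ?_
      intro i hi hilt
      refine h3 i hi ?_
      simp only [List.mem_cons, not_or]
      constructor
      · intro hij; exact lexLt_irrefl j (hij ▸ hilt)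
      · intro hik
        exact lexLt_asymm i j hilt (hpw.1 i hik)
    · unfold tabStep
      rw [PySem.Dict.getD_insert, if_neg hjh]
      exact h3 j hj (by simp [hjnot, hjh])

def cubeList : List (Int × Int × Int) :=
  (PySem.List.pyRange 1 21 1).flatMap fun x =>
    (PySem.List.pyRange 1 21 1).flatMap fun y =>
      (PySem.List.pyRange 1 21 1).map fun z => (x, y, z)

theorem mem_cubeList (k : Int × Int × Int) : k ∈ cubeList ↔ CubeK k := by
  obtain ⟨x, y, z⟩ := k
  simp only [cubeList, List.mem_flatMap, List.mem_map, PySem.List.mem_pyRange_one, CubeK]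
  constructor
  · rintro ⟨x', ⟨hx1, hx2⟩, y', ⟨hy1, hy2⟩, z', ⟨hz1, hz2⟩, heq⟩
    obtain ⟨rfl, rfl, rfl⟩ := Prod.mk.injEq .. ▸ (by
      injection heq with h1 h2
      injection h2 with h2 h3
      exact ⟨h1, h2, h3⟩ : x' = x ∧ y' = y ∧ z' = z)
    refine ⟨by omega, by omega, by omega, by omega, by omega, by omega⟩
  · rintro ⟨h1, h2, h3, h4, h5, h6⟩
    exact ⟨x, ⟨by omega, by omega⟩, y, ⟨by omega, by omega⟩, z, ⟨by omega, by omega⟩, rfl⟩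

theorem pairwise_cubeList : List.Pairwise LexLt cubeList := by
  unfold cubeList
  rw [List.flatMap_def, List.pairwise_flatten]
  constructor
  · intro l hl
    rw [List.mem_map] at hl
    obtain ⟨x, hx, rfl⟩ := hl
    rw [List.flatMap_def, List.pairwise_flatten]
    constructor
    · intro l' hl'
      rw [List.mem_map] at hl'
      obtain ⟨y, hy, rfl⟩ := hl'
      rw [List.pairwise_map]
      refine List.Pairwise.imp ?_ (PySem.List.pairwise_lt_pyRange_one 1 21)
      intro z z' hzz; unfold LexLt; simp; omega
    · rw [List.pairwise_map]
      refine List.Pairwise.imp ?_ (PySem.List.pairwise_lt_pyRange_one 1 21)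
      intro y y' hyy p hp q hq
      rw [List.mem_map] at hp hq
      obtain ⟨z, _, rfl⟩ := hp
      obtain ⟨z', _, rfl⟩ := hq
      unfold LexLt; simp; omega
  · rw [List.pairwise_map]
    refine List.Pairwise.imp ?_ (PySem.List.pairwise_lt_pyRange_one 1 21)
    intro x x' hxx p hp q hq
    rw [List.flatMap_def, List.mem_flatten] at hp hq
    obtain ⟨l, hl, hpl⟩ := hp
    rw [List.mem_map] at hl
    obtain ⟨y, _, rfl⟩ := hl
    rw [List.mem_map] at hpl
    obtain ⟨z, _, rfl⟩ := hpl
    obtain ⟨l', hl', hql⟩ := hq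
    rw [List.mem_map] at hl'
    obtain ⟨y', _, rfl⟩ := hl'
    rw [List.mem_map] at hql
    obtain ⟨z', _, rfl⟩ := hql
    unfold LexLt; simp; omega

theorem foldl_inner (x y : Int) (zs : List Int) (t : PySem.Dict (Int × Int × Int) Int) :
    zs.foldl (fun t z => tabStep t (x, y, z)) t
      = (zs.map fun z => ((x, y, z) : Int × Int × Int)).foldl tabStep t := by
  rw [List.foldl_map]

theorem foldl_mid (x : Int) (ys : List Int) :
    ∀ t : PySem.Dict (Int × Int × Int) Int,
    ys.foldl (fun t y => (PySem.List.pyRange 1 21 1).foldl (fun t z => tabStep t (x, y, z)) t) t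
      = (ys.flatMap fun y => (PySem.List.pyRange 1 21 1).map fun z =>
          ((x, y, z) : Int × Int × Int)).foldl tabStep t := by
  induction ys with
  | nil => intro t; rfl
  | cons y ys ih =>
    intro t
    rw [List.foldl_cons, List.flatMap_cons, List.foldl_append, ih, foldl_inner]

theorem foldl_outer (xs : List Int) :
    ∀ t : PySem.Dict (Int × Int × Int) Int,
    xs.foldl (fun t x =>
      (PySem.List.pyRange 1 21 1).foldl (fun t y =>
        (PySem.List.pyRange 1 21 1).foldl (fun t z => tabStep t (x, y, z)) t) t) t
      = (xs.flatMap fun x => (PySem.List.pyRange 1 21 1).flatMap fun y =>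
          (PySem.List.pyRange 1 21 1).map fun z => ((x, y, z) : Int × Int × Int)).foldl tabStep t := by
  induction xs with
  | nil => intro t; rfl
  | cons x xs ih =>
    intro t
    rw [List.foldl_cons, List.flatMap_cons, List.foldl_append, ih, foldl_mid]

theorem dpTable_eq_foldl : dpTable = cubeList.foldl tabStep PySem.Dict.empty := by
  unfold dpTable cubeList
  exact foldl_outer (PySem.List.pyRange 1 21 1) PySem.Dict.empty

theorem table_correct (k : Int × Int × Int) (hk : CubeK k) :
    PySem.Dict.getD dpTable k 0 = W k.1 k.2.1 k.2.2 := by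
  rw [dpTable_eq_foldl]
  refine fold_inv cubeList PySem.Dict.empty pairwise_cubeList
    (fun k' hk' => (mem_cubeList k').1 hk') ?_ k hk
  intro j hj hjnot
  exact absurd ((mem_cubeList j).2 hj) hjnot

theorem dp_alt_eq_WClamp (a b c : Int) : dp_alt a b c = WClamp a b c := by
  unfold dp_alt WClamp
  split_ifs with h1 h2
  · rfl
  · exact table_correct (20, 20, 20) (by unfold CubeK; dsimp only; omega)
  · push_neg at h1 h2
    exact table_correct (a, b, c) (by unfold CubeK; dsimp only; omega)

-- ===== VERDICT (by name: the statement is the Claim_ definition above) =====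
theorem dp_spec : Claim_equal_dp := by
  intro a b c _
  unfold Spec_dp
  rw [dp_eq_WClamp, dp_alt_eq_WClamp]
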